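-- pv_equiv track=rewrite | github.com/Gokulr08/NewsScraper | main.py | replace_html_entities
-- ===== SOURCE A (Python) =====
-- def replace_html_entities(html_content):
--     html_entities = {
--         '&#8217;': "'", '&#8216;': "'", '&#8220;': '"', '&#8221;': '"',
--         '&#8211;': '-', '&#8212;': '--', '&nbsp;': ' ', '&amp;': '&',
--         '&lt;': '<', '&gt;': '>', '&quot;': '"', '&apos;': "'",
--         '&#39;': "'", '&#x27;': "'",
--     }
--     for entity, replacement in html_entities.items():
--         html_content = html_content.replace(entity, replacement)
--     return html_content
-- ===== SOURCE B (Python) =====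
-- def replace_html_entities(html_content):
--     table = [
--         ('&#8217;', "'"), ('&#8216;', "'"), ('&#8220;', '"'), ('&#8221;', '"'),
--         ('&#8211;', '-'), ('&#8212;', '--'), ('&nbsp;', ' '), ('&amp;', '&'),
--         ('&lt;', '<'), ('&gt;', '>'), ('&quot;', '"'), ('&apos;', "'"),
--         ('&#39;', "'"), ('&#x27;', "'"),
--     ]
--     out = []
--     i = 0
--     n = len(html_content)
--     while i < n:
--         if html_content[i] == '&':
--             for entity, replacement in table:
--                 if html_content.startswith(entity, i):
--                     out.append(replacement)
--                     i += len(entity)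
--                     break
--             else:
--                 out.append(html_content[i])
--                 i += 1
--         else:
--             out.append(html_content[i])
--             i += 1
--     return ''.join(out)
-- ===== Notes on version B (the rewrite author's own statement) =====
-- stated objective: alternative
-- what changed: A makes 14 sequential full-string .replace passes (each pass rescans the whole string); B makes one left-to-right pass that, at each '&', matches the entity table once and substitutes, so the string is traversed a single time.
-- intended difference: On inputs where '&amp;' is immediately followed by the tail of an entity that A's loop replaces after it (i.e. a double-escaped entity such as the substring '&amp;lt;'), A's '&amp;' pass manufactures a new entity that a later pass then replaces, so A double-unescapes ('&amp;lt;' becomes '<'); B returns the single unescape ('&lt;'), which is what that text encodes. — e.g. on replace_html_entities("&amp;lt;"): A returns "<", B returns "&lt;"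
import Mathlib
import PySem

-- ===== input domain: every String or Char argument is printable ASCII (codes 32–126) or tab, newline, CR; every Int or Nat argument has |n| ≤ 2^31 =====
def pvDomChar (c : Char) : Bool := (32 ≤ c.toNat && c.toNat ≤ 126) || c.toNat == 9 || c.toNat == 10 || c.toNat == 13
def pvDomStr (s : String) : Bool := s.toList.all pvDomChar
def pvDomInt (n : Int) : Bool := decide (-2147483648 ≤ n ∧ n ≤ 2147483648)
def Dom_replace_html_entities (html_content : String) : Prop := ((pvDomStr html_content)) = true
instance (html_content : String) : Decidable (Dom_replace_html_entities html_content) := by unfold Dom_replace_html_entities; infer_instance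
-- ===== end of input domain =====

-- B replaces A's 14 sequential full-string .replace passes by one left-to-right scan with
-- a first-match entity table (objective: alternative single-pass algorithm; not claimed faster).

-- ===== PORT A =====
def replace_html_entities (html_content : String) : String :=
  let html_entities : PySem.Dict String String := PySem.Dict.ofList
    [("&#8217;", "'"), ("&#8216;", "'"), ("&#8220;", "\""), ("&#8221;", "\""),
     ("&#8211;", "-"), ("&#8212;", "--"), ("&nbsp;", " "), ("&amp;", "&"),
     ("&lt;", "<"), ("&gt;", ">"), ("&quot;", "\""), ("&apos;", "'"),
     ("&#39;", "'"), ("&#x27;", "'")]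
  html_entities.items.foldl (fun s p => PySem.Str.replace s p.1 p.2) html_content

-- ===== PORT B =====
-- B's table, with entity and replacement as code-point lists (port boundary: str -> List Char)
def tableBc : List (List Char × List Char) :=
  [(['&', '#', '8', '2', '1', '7', ';'], ['\'']),
   (['&', '#', '8', '2', '1', '6', ';'], ['\'']),
   (['&', '#', '8', '2', '2', '0', ';'], ['"']),
   (['&', '#', '8', '2', '2', '1', ';'], ['"']),
   (['&', '#', '8', '2', '1', '1', ';'], ['-']),
   (['&', '#', '8', '2', '1', '2', ';'], ['-', '-']),
   (['&', 'n', 'b', 's', 'p', ';'], [' ']),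
   (['&', 'a', 'm', 'p', ';'], ['&']),
   (['&', 'l', 't', ';'], ['<']),
   (['&', 'g', 't', ';'], ['>']),
   (['&', 'q', 'u', 'o', 't', ';'], ['"']),
   (['&', 'a', 'p', 'o', 's', ';'], ['\'']),
   (['&', '#', '3', '9', ';'], ['\'']),
   (['&', '#', 'x', '2', '7', ';'], ['\''])]

-- B's single left-to-right pass: at a '&', the first table entry that starts here is
-- emitted and skipped; otherwise the character is copied.
def scanB : List Char → List Char
  | [] => []
  | c :: t =>
    if c = '&' then
      match tableBc.find? (fun p => p.1.isPrefixOf (c :: t)) with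
      | some p => p.2 ++ scanB (t.drop (p.1.length - 1))
      | none => c :: scanB t
    else c :: scanB t
termination_by l => l.length
decreasing_by all_goals (simp; try omega)

def replace_html_entities_alt (html_content : String) : String :=
  String.ofList (scanB html_content.toList)

-- ===== PRECONDITION & SPEC =====
-- On inputs containing a double-escaped entity '&amp;lt;', '&amp;gt;', '&amp;quot;',
-- '&amp;apos;', '&amp;#39;' or '&amp;#x27;', A's '&amp;' pass feeds later passes and it
-- double-unescapes (e.g. returns '<' for '&amp;lt;'), while B returns the intended single
-- unescape ('&lt;'), which is what '&amp;lt;' encodes.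
def D_replace_html_entities (html_content : String) : Prop :=
  PySem.Str.isIn "&amp;lt;" html_content = true ∨ PySem.Str.isIn "&amp;gt;" html_content = true ∨
  PySem.Str.isIn "&amp;quot;" html_content = true ∨ PySem.Str.isIn "&amp;apos;" html_content = true ∨
  PySem.Str.isIn "&amp;#39;" html_content = true ∨ PySem.Str.isIn "&amp;#x27;" html_content = true
instance (html_content : String) : Decidable (D_replace_html_entities html_content) := by
  unfold D_replace_html_entities; infer_instance

def Spec_replace_html_entities (html_content : String) (out : String) : Prop :=
  ¬ D_replace_html_entities html_content → out = replace_html_entities_alt html_content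
instance (html_content : String) (out : String) : Decidable (Spec_replace_html_entities html_content out) := by
  unfold Spec_replace_html_entities; infer_instance

def pvDiffWitness_replace_html_entities : String := "&amp;lt;"
def pvDiffWitnessOut_replace_html_entities : String × String := ("<", "&lt;")

-- ===== CLAIM (what is proved, stated in full; the proofs are below) =====
def Claim_unchanged_replace_html_entities : Prop := ∀ (html_content : String), Dom_replace_html_entities html_content → Spec_replace_html_entities html_content (replace_html_entities html_content)
def Claim_changed_replace_html_entities : Prop := Dom_replace_html_entities (pvDiffWitness_replace_html_entities) ∧ D_replace_html_entities (pvDiffWitness_replace_html_entities) ∧ replace_html_entities (pvDiffWitness_replace_html_entities) = pvDiffWitnessOut_replace_html_entities.1 ∧ replace_html_entities_alt (pvDiffWitness_replace_html_entities) = pvDiffWitnessOut_replace_html_entities.2 ∧ pvDiffWitnessOut_replace_html_entities.1 ≠ pvDiffWitnessOut_replace_html_entities.2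
def Claim_exact_replace_html_entities : Prop := ∀ (html_content : String), Dom_replace_html_entities html_content → D_replace_html_entities html_content → replace_html_entities html_content ≠ replace_html_entities_alt html_content

-- ===== LEMMAS AND PROOFS =====
def W6c_replace : List (List Char) :=
  [['&', 'a', 'm', 'p', ';', 'l', 't', ';'],
   ['&', 'a', 'm', 'p', ';', 'g', 't', ';'],
   ['&', 'a', 'm', 'p', ';', 'q', 'u', 'o', 't', ';'],
   ['&', 'a', 'm', 'p', ';', 'a', 'p', 'o', 's', ';'],
   ['&', 'a', 'm', 'p', ';', '#', '3', '9', ';'],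
   ['&', 'a', 'm', 'p', ';', '#', 'x', '2', '7', ';']]

def scanK (k v : List Char) : List Char → List Char
  | [] => []
  | c :: t =>
    if k.isPrefixOf (c :: t) then v ++ scanK k v (t.drop (k.length - 1))
    else c :: scanK k v t
termination_by l => l.length
decreasing_by all_goals (simp; try omega)

theorem go_eq_scanK (k v : List Char) (hk : k ≠ []) :
    ∀ n (l : List Char) (fuel : Nat) (acc : List Char), l.length = n → l.length ≤ fuel →
      PySem.Chars.replace.go k v fuel l acc = acc.reverse ++ scanK k v l := by
  intro n
  induction n using Nat.strong_induction_on with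
  | _ n ih =>
    intro l fuel acc hn hf
    have hk1 : 1 ≤ k.length := by cases k <;> simp_all
    match l, fuel with
    | [], 0 => simp [PySem.Chars.replace.go, scanK]
    | [], (f+1) => simp [PySem.Chars.replace.go, scanK]
    | (c :: t), (f+1) =>
      rw [PySem.Chars.replace.go, scanK]
      by_cases hp : k.isPrefixOf (c :: t)
      · simp only [hp, if_true]
        have hd : List.drop k.length (c :: t) = t.drop (k.length - 1) := by
          obtain ⟨m, hm⟩ : ∃ m, k.length = m + 1 := ⟨k.length - 1, by omega⟩
          simp [hm]
        have hlt : (t.drop (k.length - 1)).length < n := by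
          simp only [List.length_drop]
          simp at hn; omega
        rw [hd, ih _ hlt _ f _ rfl (by simp at hn hf ⊢; omega)]
        simp
      · simp only [hp, if_false, Bool.false_eq_true]
        have hlt : t.length < n := by simp at hn; omega
        rw [ih _ hlt _ f _ rfl (by simp at hn hf ⊢; omega)]
        simp

theorem replace_eq_scanK (l k v : List Char) (hk : k ≠ []) :
    PySem.Chars.replace l k v = scanK k v l := by
  rw [PySem.Chars.replace]
  have : k.isEmpty = false := by cases k <;> simp_all
  rw [this]
  simpa using go_eq_scanK k v hk l.length l l.length [] rfl le_rfl

theorem scanK_nil (k v : List Char) : scanK k v [] = [] := by rw [scanK]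

theorem scanK_match (k v l : List Char) (hk : k ≠ []) (h : k <+: l) :
    scanK k v l = v ++ scanK k v (l.drop k.length) := by
  match l with
  | [] => exact absurd (List.prefix_nil.mp h) hk
  | c :: t =>
    rw [scanK]
    rw [if_pos (List.isPrefixOf_iff_prefix.mpr h)]
    obtain ⟨m, hm⟩ : ∃ m, k.length = m + 1 := ⟨k.length - 1, by cases k <;> simp_all⟩
    simp [hm]

theorem scanK_nomatch (k v : List Char) (c : Char) (t : List Char) (h : ¬ k <+: (c :: t)) :
    scanK k v (c :: t) = c :: scanK k v t := by
  rw [scanK]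
  rw [if_neg (by simpa [List.isPrefixOf_iff_prefix] using h)]

theorem scanK_stepN (k v : List Char) (_hk : k ≠ []) :
    ∀ (a l : List Char), (∀ m, m < a.length → ¬ k <+: (a.drop m ++ l)) →
      scanK k v (a ++ l) = a ++ scanK k v l := by
  intro a
  induction a with
  | nil => simp
  | cons c a' ih =>
    intro l h
    rw [List.cons_append, scanK_nomatch k v c (a' ++ l) (by simpa using h 0 (by simp))]
    rw [ih l (fun m hm => by simpa using h (m+1) (by simpa using hm))]
    simp

theorem scanK_preserve1 (k v : List Char) (hk : k ≠ []) (vh : Char) (hv : v.head? = some vh) :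
    ∀ n (l t : List Char), l.length ≤ n → (∀ c ∈ t, c ≠ vh) → t <+: scanK k v l → t <+: l := by
  intro n
  induction n with
  | zero =>
    intro l t hl ht hp
    have : l = [] := by cases l <;> simp_all
    subst this; rw [scanK_nil] at hp
    simp [List.prefix_nil.mp hp]
  | succ n ih =>
    intro l t hl ht hp
    match l with
    | [] => rw [scanK_nil] at hp; simp [List.prefix_nil.mp hp]
    | c :: t0 =>
      by_cases hm : k <+: (c :: t0)
      · rw [scanK_match k v _ hk hm] at hp
        match t with
        | [] => exact List.nil_prefix
        | th :: t' =>
          exfalso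
          obtain ⟨v0, vt, rfl⟩ : ∃ v0 vt, v = v0 :: vt := by
            cases v <;> simp_all
          have : th = v0 := by
            have := List.cons_prefix_cons.mp (by simpa using hp)
            exact this.1
          simp at hv
          exact ht th (by simp) (this.trans hv)
      · rw [scanK_nomatch k v c t0 hm] at hp
        match t with
        | [] => exact List.nil_prefix
        | th :: t' =>
          obtain ⟨h1, h2⟩ := List.cons_prefix_cons.mp hp
          subst h1
          exact List.cons_prefix_cons.mpr ⟨rfl, ih t0 t' (by simp_all) (fun c hc => ht c (by simp [hc])) h2⟩

def VHrepl : List Char := ['\'', '"', '-', ' ', '&', '<', '>']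

def applyPasses (ps : List (List Char × List Char)) (l : List Char) : List Char :=
  ps.foldl (fun x p => PySem.Chars.replace x p.1 p.2) l

theorem applyPasses_cons (p : List Char × List Char) (ps : List (List Char × List Char)) (l : List Char) :
    applyPasses (p :: ps) l = applyPasses ps (PySem.Chars.replace l p.1 p.2) := rfl

theorem applyPasses_append (ps qs : List (List Char × List Char)) (l : List Char) :
    applyPasses (ps ++ qs) l = applyPasses qs (applyPasses ps l) := by
  simp [applyPasses, List.foldl_append]

theorem applyPasses_nil_input (ps : List (List Char × List Char))
    (hps : ∀ p ∈ ps, p.1 ≠ []) : applyPasses ps [] = [] := by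
  induction ps with
  | nil => rfl
  | cons p ps ih =>
    rw [applyPasses_cons, replace_eq_scanK _ _ _ (hps p (by simp)), scanK_nil]
    exact ih (fun q hq => hps q (by simp [hq]))

theorem preserveN (ps : List (List Char × List Char)) :
    ∀ (l t : List Char),
      (hps : ∀ p ∈ ps, p.1 ≠ [] ∧ ∃ h, p.2.head? = some h ∧ h ∉ t) →
      t <+: applyPasses ps l → t <+: l := by
  induction ps with
  | nil => intro l t _ h; simpa [applyPasses] using h
  | cons p ps ih =>
    intro l t hps hp
    rw [applyPasses_cons] at hp
    obtain ⟨hk, vh, hvh, hnot⟩ := hps p (by simp)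
    have h1 : t <+: PySem.Chars.replace l p.1 p.2 :=
      ih _ t (fun q hq => hps q (by simp [hq])) hp
    rw [replace_eq_scanK _ _ _ hk] at h1
    exact scanK_preserve1 p.1 p.2 hk vh hvh l.length l t le_rfl
      (fun c hc => fun hce => hnot (hce ▸ hc)) h1

theorem splitPasses (ps : List (List Char × List Char)) :
    ∀ (a r : List Char), a ≠ [] →
      (hps : ∀ p ∈ ps, p.1 ≠ [] ∧ p.1.head? = some '&' ∧ (∀ c ∈ p.1.tail, c ∉ VHrepl) ∧
             ∃ h, p.2.head? = some h ∧ h ∈ VHrepl) →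
      (h2 : ∀ m, 0 < m → ∀ x, ((a.drop m).head? = some x) → x ≠ '&') →
      (h3a : ∀ p ∈ ps, ¬ p.1 <+: a) →
      (h3b : ∀ p ∈ ps, ∀ t, p.1 = a ++ t → ¬ t <+: r) →
      applyPasses ps (a ++ r) = a ++ applyPasses ps r := by
  induction ps with
  | nil => intro a r _ _ _ _ _; rfl
  | cons p ps ih =>
    intro a r ha hps h2 h3a h3b
    obtain ⟨hk, hkh, hktail, vh, hvh, hvVH⟩ := hps p (by simp)
    -- step 1: the first pass keeps the split
    have hstep : PySem.Chars.replace (a ++ r) p.1 p.2 = a ++ PySem.Chars.replace r p.1 p.2 := by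
      rw [replace_eq_scanK _ _ _ hk, replace_eq_scanK _ _ _ hk]
      apply scanK_stepN _ _ hk
      intro m hm hcon
      rcases Nat.eq_zero_or_pos m with rfl | hm0
      · simp only [List.drop_zero] at hcon
        rcases List.prefix_or_prefix_of_prefix hcon (List.prefix_append a r) with hc | hc
        · exact h3a p (by simp) hc
        · obtain ⟨t, ht⟩ := hc
          rw [← ht] at hcon
          exact h3b p (by simp) t ht.symm ((List.prefix_append_right_inj a).mp hcon)
      · obtain ⟨x, y, hxy⟩ := List.exists_cons_of_ne_nil (show a.drop m ≠ [] by simp; omega)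
        have hx : x ≠ '&' := h2 m hm0 x (by simp [hxy])
        rw [hxy] at hcon
        obtain ⟨kt, hkt⟩ : ∃ kt, p.1 = '&' :: kt := by
          rcases hp1 : p.1 with _ | ⟨k0, kt⟩
          · exact absurd hp1 hk
          · rw [hp1] at hkh; simp at hkh; exact ⟨kt, by rw [hkh]⟩
        rw [hkt, List.cons_append] at hcon
        exact hx ((List.cons_prefix_cons.mp hcon).1.symm)
    rw [applyPasses_cons, applyPasses_cons, hstep]
    -- step 2: induction for the remaining passes, with r replaced
    apply ih a (PySem.Chars.replace r p.1 p.2) ha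
      (fun q hq => hps q (by simp [hq]))
      h2
      (fun q hq => h3a q (by simp [hq]))
    intro q hq t hqa hcon
    obtain ⟨hqk, hqkh, hqktail, qvh, hqvh, hqvVH⟩ := hps q (by simp [hq])
    -- t is made of tail characters of q.1, hence avoids VHrepl, hence avoids p.2's head
    have htclean : ∀ c ∈ t, c ∉ VHrepl := by
      intro c hc
      apply hqktail
      obtain ⟨a0, a', ha'⟩ := List.exists_cons_of_ne_nil ha
      rw [hqa, ha']; simp [hc]
    rw [replace_eq_scanK _ _ _ hk] at hcon
    have := scanK_preserve1 p.1 p.2 hk vh hvh r.length r t le_rfl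
      (fun c hc hce => (htclean c hc) (hce ▸ hvVH)) hcon
    exact h3b q (by simp [hq]) t hqa this

def ampPair : List Char × List Char := (['&','a','m','p',';'], ['&'])
def tabB7 : List (List Char × List Char) := List.take 7 tableBc
def tabA6 : List (List Char × List Char) := List.drop 8 tableBc

theorem hsplit : tableBc = tabB7 ++ ampPair :: tabA6 := by rfl
theorem hTableB : ∀ p ∈ tableBc, p.1 ≠ [] ∧ p.1.head? = some '&' ∧
    (p.1.tail.all (fun c => decide (c ∉ VHrepl))) = true ∧
    p.2 ≠ [] ∧ p.2.headD ' ' ∈ VHrepl := by decide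

theorem hTable : ∀ p ∈ tableBc, p.1 ≠ [] ∧ p.1.head? = some '&' ∧ (∀ c ∈ p.1.tail, c ∉ VHrepl) ∧
    p.2 ≠ [] ∧ p.2.headD ' ' ∈ VHrepl := by
  intro p hp
  obtain ⟨h1, h2, h3, h4, h5⟩ := hTableB p hp
  exact ⟨h1, h2, fun c hc => of_decide_eq_true (List.all_eq_true.mp h3 c hc), h4, h5⟩
theorem hPF : ∀ p ∈ tableBc, ∀ q ∈ tableBc, p.1 <+: q.1 → p = q := by decide
theorem hLen : ∀ p ∈ tableBc, 4 ≤ p.1.length ∧ p.2.length ≤ 2 ∧ p.2 ≠ [] := by decide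
theorem hKeyTailB : ∀ p ∈ tableBc, (p.1.tail.all (fun c => decide (c ≠ '&'))) = true := by decide
theorem hKeyTail : ∀ p ∈ tableBc, ∀ c ∈ p.1.tail, c ≠ '&' :=
  fun p hp c hc => of_decide_eq_true (List.all_eq_true.mp (hKeyTailB p hp) c hc)
theorem hValTailB : ∀ p ∈ tableBc, (p.2.tail.all (fun c => decide (c ≠ '&'))) = true := by decide
theorem hValTail : ∀ p ∈ tableBc, ∀ c ∈ p.2.tail, c ≠ '&' :=
  fun p hp c hc => of_decide_eq_true (List.all_eq_true.mp (hValTailB p hp) c hc)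
theorem hNoAmpVal : ∀ p ∈ tableBc, p ≠ ampPair → p.2.headD ' ' ≠ '&' := by decide
theorem hNodup : tableBc.Nodup := by decide
theorem hA6 : ∀ q ∈ tabA6, (['&','a','m','p',';'] ++ q.1.tail) ∈ W6c_replace := by decide


theorem head?_headD_of_ne_nil {α : Type} (l : List α) (d : α) (h : l ≠ []) :
    l.head? = some (l.headD d) := by cases l with | nil => simp_all | cons a t => rfl

theorem hTableE : ∀ p ∈ tableBc, p.1 ≠ [] ∧ p.1.head? = some '&' ∧ (∀ c ∈ p.1.tail, c ∉ VHrepl) ∧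
    ∃ h, p.2.head? = some h ∧ h ∈ VHrepl := by
  intro p hp
  obtain ⟨h1, h2, h3, h4, h5⟩ := hTable p hp
  exact ⟨h1, h2, h3, p.2.headD ' ', head?_headD_of_ne_nil p.2 ' ' h4, h5⟩

theorem find?_unique {α : Type} (f : α → Bool) :
    ∀ (ps : List α) (p : α), p ∈ ps → f p = true → (∀ q ∈ ps, f q = true → q = p) →
      ps.find? f = some p := by
  intro ps
  induction ps with
  | nil => simp
  | cons q ps ih =>
    intro p hp hf huniq
    by_cases hq : f q = true
    · rw [List.find?_cons_of_pos hq, huniq q (by simp) hq]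
    · rw [List.find?_cons_of_neg (by simpa using hq)]
      have hp' : p ∈ ps := by
        rcases List.mem_cons.mp hp with rfl | h
        · exact absurd hf hq
        · exact h
      exact ih p hp' hf (fun r hr hfr => huniq r (by simp [hr]) hfr)

theorem drop_head_mem_tail {α : Type} :
    ∀ (l : List α) (m : Nat) (x : α), 0 < m → (l.drop m).head? = some x → x ∈ l.tail := by
  intro l m x hm h
  match l, m with
  | [], m => simp at h
  | (c :: t), (m+1) =>
    simp only [List.drop_succ_cons] at h
    simp only [List.tail_cons]
    have hx : x ∈ t.drop m := by
      match hdm : t.drop m with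
      | [] => rw [hdm] at h; simp at h
      | (y :: ys) => rw [hdm] at h; simp at h; simp [h]
    exact List.mem_of_mem_drop hx

theorem applyKey (p : List Char × List Char) (hpmem : p ∈ tableBc)
    (bf af : List (List Char × List Char)) (r : List Char)
    (hdec : tableBc = bf ++ p :: af)
    (hafter : ∀ q ∈ af, ∀ t', q.1 = p.2 ++ t' → ¬ t' <+: applyPasses (bf ++ [p]) r) :
    applyPasses tableBc (p.1 ++ r) = p.2 ++ applyPasses tableBc r := by
  obtain ⟨hk, hkh, hktail, hv, hvh⟩ := hTable p hpmem
  have hmem_bf : ∀ q ∈ bf, q ∈ tableBc := fun q hq => hdec ▸ List.mem_append_left _ hq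
  have hmem_af : ∀ q ∈ af, q ∈ tableBc :=
    fun q hq => hdec ▸ List.mem_append_right _ (List.mem_cons_of_mem _ hq)
  have hpnot : p ∉ bf := by
    have hnd := hNodup
    rw [hdec] at hnd
    have := (List.nodup_cons.mp (List.nodup_middle.mp hnd)).1
    intro hc; exact this (List.mem_append_left _ hc)
  have hi : applyPasses bf (p.1 ++ r) = p.1 ++ applyPasses bf r := by
    apply splitPasses bf p.1 r hk (fun q hq => hTableE q (hmem_bf q hq))
    · intro m hm x hx
      exact hKeyTail p hpmem x (drop_head_mem_tail p.1 m x hm hx)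
    · intro q hq hpre
      exact hpnot ((hPF q (hmem_bf q hq) p hpmem hpre) ▸ hq)
    · intro q hq t hqt _
      have : p.1 <+: q.1 := ⟨t, hqt.symm⟩
      exact hpnot ((hPF p hpmem q (hmem_bf q hq) this).symm ▸ hq)
  have hii : PySem.Chars.replace (p.1 ++ applyPasses bf r) p.1 p.2
      = p.2 ++ PySem.Chars.replace (applyPasses bf r) p.1 p.2 := by
    rw [replace_eq_scanK _ _ _ hk, replace_eq_scanK _ _ _ hk,
        scanK_match p.1 p.2 _ hk (List.prefix_append _ _), List.drop_left]
  have hsing : ∀ y : List Char, applyPasses [p] y = PySem.Chars.replace y p.1 p.2 := fun y => rfl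
  have hiii : applyPasses af (p.2 ++ applyPasses (bf ++ [p]) r)
      = p.2 ++ applyPasses af (applyPasses (bf ++ [p]) r) := by
    apply splitPasses af p.2 _ hv (fun q hq => hTableE q (hmem_af q hq))
    · intro m hm x hx
      exact hValTail p hpmem x (drop_head_mem_tail p.2 m x hm hx)
    · intro q hq hpre
      have h1 := (hLen q (hmem_af q hq)).1
      have h2 := (hLen p hpmem).2.1
      have := hpre.length_le
      omega
    · exact hafter
  calc applyPasses tableBc (p.1 ++ r)
      = applyPasses af (applyPasses [p] (applyPasses bf (p.1 ++ r))) := by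
        rw [hdec, show bf ++ p :: af = (bf ++ [p]) ++ af by simp, applyPasses_append,
            applyPasses_append]
    _ = applyPasses af (p.2 ++ applyPasses (bf ++ [p]) r) := by
        rw [hi, hsing, hii, applyPasses_append, hsing]
    _ = p.2 ++ applyPasses af (applyPasses (bf ++ [p]) r) := hiii
    _ = p.2 ++ applyPasses tableBc r := by
        rw [← applyPasses_append, show (bf ++ [p]) ++ af = bf ++ p :: af by simp, ← hdec]

set_option maxHeartbeats 2000000 in
theorem mainEq : ∀ n (l : List Char), l.length ≤ n → (∀ w ∈ W6c_replace, ¬ w <:+: l) →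
    applyPasses tableBc l = scanB l := by
  intro n
  induction n using Nat.strong_induction_on with
  | _ n ih =>
    intro l hln hD
    match l with
    | [] =>
      rw [applyPasses_nil_input tableBc (fun q hq => (hTable q hq).1)]
      rw [scanB]
    | (c :: t) =>
      by_cases hfind : ∃ p ∈ tableBc, p.1 <+: (c :: t)
      · obtain ⟨p, hpmem, hpre⟩ := hfind
        obtain ⟨hk, hkh, hktail, hv, hvh⟩ := hTable p hpmem
        obtain ⟨kt, hkt⟩ : ∃ kt, p.1 = '&' :: kt := by
          rcases hp1 : p.1 with _ | ⟨k0, kt⟩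
          · exact absurd hp1 hk
          · rw [hp1] at hkh; simp at hkh; exact ⟨kt, by rw [hkh]⟩
        obtain ⟨r, hr⟩ := hpre
        have hc : c = '&' := by
          rw [hkt, List.cons_append] at hr
          exact ((List.cons.injEq _ _ _ _).mp hr).1.symm
        have ht : t = kt ++ r := by
          rw [hkt, List.cons_append] at hr
          exact ((List.cons.injEq _ _ _ _).mp hr).2.symm
        have hpre' : p.1 <+: c :: t := ⟨r, hr⟩
        have huniq : ∀ q ∈ tableBc, (q.1.isPrefixOf (c :: t)) = true → q = p := by
          intro q hq hfq
          have hql : q.1 <+: c :: t := List.isPrefixOf_iff_prefix.mp hfq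
          rcases List.prefix_or_prefix_of_prefix hql hpre' with h | h
          · exact hPF q hq p hpmem h
          · exact (hPF p hpmem q hq h).symm
        have hscan : scanB (c :: t) = p.2 ++ scanB (t.drop (p.1.length - 1)) := by
          rw [scanB, if_pos hc,
              find?_unique (fun q => q.1.isPrefixOf (c :: t)) tableBc p hpmem
                (List.isPrefixOf_iff_prefix.mpr hpre') huniq]
        have hdrop : t.drop (p.1.length - 1) = r := by
          rw [ht, hkt]
          simp only [List.length_cons, Nat.add_sub_cancel]
          exact List.drop_left
        have hsuffr : ∀ w ∈ W6c_replace, ¬ w <:+: r := by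
          intro w hw hcon
          exact hD w hw (hcon.trans (List.IsSuffix.isInfix ⟨p.1, hr⟩))
        have hafterFalse : ∀ bf af, tableBc = bf ++ p :: af →
            (∀ q ∈ af, q ∈ tabA6) →
            (∀ q ∈ af, ∀ t', q.1 = p.2 ++ t' → ¬ t' <+: applyPasses (bf ++ [p]) r) := by
          intro bf af hdec hsubA6 q hq t' hqt hcon
          obtain ⟨hqk, hqkh, hqktail, hqv, hqvh⟩ := hTable q
            (hdec ▸ List.mem_append_right _ (List.mem_cons_of_mem _ hq))
          obtain ⟨v0, vt, hv0⟩ : ∃ v0 vt, p.2 = v0 :: vt := by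
            rcases hp2 : p.2 with _ | ⟨v0, vt⟩
            · exact absurd hp2 hv
            · exact ⟨v0, vt, rfl⟩
          -- t' avoids the value head characters, so it survives the earlier passes
          have htclean : ∀ ch ∈ t', ch ∉ VHrepl := by
            intro ch hch
            apply hqktail
            rw [hqt, hv0]
            simp [hch]
          have ht'r : t' <+: r := by
            apply preserveN (bf ++ [p]) r t' _ hcon
            intro q' hq'
            have hq'mem : q' ∈ tableBc := by
              rw [hdec]
              rcases List.mem_append.mp hq' with h | h
              · exact List.mem_append_left _ h
              · simp at h
                exact List.mem_append_right _ (h ▸ List.mem_cons_self)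
            obtain ⟨h1, _, _, h4, h5⟩ := hTable q' hq'mem
            refine ⟨h1, q'.2.headD ' ', head?_headD_of_ne_nil q'.2 ' ' h4, fun hmem => ?_⟩
            exact htclean _ hmem h5
          -- q is one of the six entries after '&amp;', and p is the '&amp;' entry itself
          have hqA6 := hsubA6 q hq
          have hpamp : p = ampPair := by
            have hv0amp : v0 = '&' := by
              rw [hv0] at hqt
              rw [hqt] at hqkh
              simp at hqkh
              exact hqkh
            by_contra hne
            exact hNoAmpVal p hpmem hne (by rw [hv0, hv0amp]; rfl)
          have ht'tail : t' = q.1.tail := by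
            rw [hqt, hpamp]
            rfl
          -- so the double-escaped entity was a substring of the input: contradiction
          apply hD (['&','a','m','p',';'] ++ q.1.tail) (hA6 q hqA6)
          obtain ⟨rest, hrest⟩ := ht'r
          have : c :: t = (['&','a','m','p',';'] ++ q.1.tail) ++ rest := by
            rw [← hr, hpamp, ← ht'tail, ← hrest]
            simp [ampPair]
          exact ⟨[], rest, by simpa using this.symm⟩
        have happ : applyPasses tableBc (p.1 ++ r) = p.2 ++ applyPasses tableBc r := by
          by_cases hpe : p = ampPair
          · refine applyKey p hpmem tabB7 tabA6 r (by rw [hpe]; exact hsplit) ?_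
            exact hafterFalse tabB7 tabA6 (by rw [hpe]; exact hsplit) (fun q hq => hq)
          · obtain ⟨bf, af, hdec⟩ := List.append_of_mem hpmem
            refine applyKey p hpmem bf af r hdec ?_
            intro q hq t' hqt hcon
            -- p.2 would have to start with '&', making p the '&amp;' entry: contradiction
            obtain ⟨hqk, hqkh, _, _, _⟩ := hTable q
              (hdec ▸ List.mem_append_right _ (List.mem_cons_of_mem _ hq))
            obtain ⟨v0, vt, hv0⟩ : ∃ v0 vt, p.2 = v0 :: vt := by
              rcases hp2 : p.2 with _ | ⟨v0, vt⟩
              · exact absurd hp2 hv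
              · exact ⟨v0, vt, rfl⟩
            have hv0amp : v0 = '&' := by
              rw [hv0] at hqt
              rw [hqt] at hqkh
              simp at hqkh
              exact hqkh
            exact hpe (by
              by_contra hne
              exact hNoAmpVal p hpmem hne (by rw [hv0, hv0amp]; rfl))
        have hlen4 := (hLen p hpmem).1
        have hrlen : r.length + 4 ≤ n := by
          have hpl : p.1.length + r.length = t.length + 1 := by
            have := congrArg List.length hr
            simpa using this
          simp at hln
          omega
        calc applyPasses tableBc (c :: t)
            = applyPasses tableBc (p.1 ++ r) := by rw [hr]
          _ = p.2 ++ applyPasses tableBc r := happ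
          _ = p.2 ++ scanB r := by rw [ih (n-1) (by omega) r (by omega) hsuffr]
          _ = p.2 ++ scanB (t.drop (p.1.length - 1)) := by rw [hdrop]
          _ = scanB (c :: t) := hscan.symm
      · push Not at hfind
        have happ : applyPasses tableBc ([c] ++ t) = [c] ++ applyPasses tableBc t := by
          apply splitPasses tableBc [c] t (by simp) hTableE
          · intro m hm x hx
            rcases m with _ | m
            · omega
            · simp at hx
          · intro q hq hpre
            have h1 := (hLen q hq).1
            have := hpre.length_le
            simp at this
            omega
          · intro q hq t' hqt hcon
            apply hfind q hq
            rw [hqt]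
            exact List.cons_prefix_cons.mpr ⟨rfl, hcon⟩
        have hscan : scanB (c :: t) = c :: scanB t := by
          rw [scanB]
          by_cases hc : c = '&'
          · rw [if_pos hc]
            rw [List.find?_eq_none.mpr (fun q hq => by
              simpa [List.isPrefixOf_iff_prefix] using hfind q hq)]
          · rw [if_neg hc]
        simp only [List.singleton_append] at happ
        rw [happ, hscan]
        have hn0 : 0 < n := by simp at hln; omega
        rw [ih (n-1) (by omega) t (by simp at hln; omega)
          (fun w hw hcon => hD w hw (hcon.trans (List.IsSuffix.isInfix ⟨[c], rfl⟩)))]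



theorem foldl_strReplace_toList (ps : List (String × String)) :
    ∀ (s : String),
      (ps.foldl (fun s p => PySem.Str.replace s p.1 p.2) s).toList
        = applyPasses (ps.map (fun p => (p.1.toList, p.2.toList))) s.toList := by
  induction ps with
  | nil => intro s; rfl
  | cons p ps ih =>
    intro s
    rw [List.foldl_cons, ih, List.map_cons, applyPasses_cons, PySem.Str.toList_replace]

def strPairs_replace : List (String × String) :=
  [("&#8217;", "'"), ("&#8216;", "'"), ("&#8220;", "\""), ("&#8221;", "\""),
   ("&#8211;", "-"), ("&#8212;", "--"), ("&nbsp;", " "), ("&amp;", "&"),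
   ("&lt;", "<"), ("&gt;", ">"), ("&quot;", "\""), ("&apos;", "'"),
   ("&#39;", "'"), ("&#x27;", "'")]

theorem items_entities :
    (PySem.Dict.ofList strPairs_replace).items = strPairs_replace := by decide

theorem strPairs_toList : strPairs_replace.map (fun p => (p.1.toList, p.2.toList)) = tableBc := by
  decide

theorem portA_toList (s : String) :
    (replace_html_entities s).toList = applyPasses tableBc s.toList := by
  show ((PySem.Dict.ofList strPairs_replace).items.foldl
      (fun s p => PySem.Str.replace s p.1 p.2) s).toList = _
  rw [items_entities, foldl_strReplace_toList, strPairs_toList]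

theorem notD_infix (s : String) (h : ¬ D_replace_html_entities s) :
    ∀ w ∈ W6c_replace, ¬ w <:+: s.toList := by
  intro w hw hcon
  apply h
  unfold D_replace_html_entities
  simp only [W6c_replace, List.mem_cons, List.not_mem_nil, or_false] at hw
  rcases hw with rfl | rfl | rfl | rfl | rfl | rfl
  · exact Or.inl ((PySem.Str.isIn_iff_infix _ _).mpr (by
      rw [show "&amp;lt;".toList = ['&','a','m','p',';','l','t',';'] from by decide]; exact hcon))
  · exact Or.inr (Or.inl ((PySem.Str.isIn_iff_infix _ _).mpr (by
      rw [show "&amp;gt;".toList = ['&','a','m','p',';','g','t',';'] from by decide]; exact hcon)))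
  · exact Or.inr (Or.inr (Or.inl ((PySem.Str.isIn_iff_infix _ _).mpr (by
      rw [show "&amp;quot;".toList = ['&','a','m','p',';','q','u','o','t',';'] from by decide]; exact hcon))))
  · exact Or.inr (Or.inr (Or.inr (Or.inl ((PySem.Str.isIn_iff_infix _ _).mpr (by
      rw [show "&amp;apos;".toList = ['&','a','m','p',';','a','p','o','s',';'] from by decide]; exact hcon)))))
  · exact Or.inr (Or.inr (Or.inr (Or.inr (Or.inl ((PySem.Str.isIn_iff_infix _ _).mpr (by
      rw [show "&amp;#39;".toList = ['&','a','m','p',';','#','3','9',';'] from by decide]; exact hcon))))))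
  · exact Or.inr (Or.inr (Or.inr (Or.inr (Or.inr ((PySem.Str.isIn_iff_infix _ _).mpr (by
      rw [show "&amp;#x27;".toList = ['&','a','m','p',';','#','x','2','7',';'] from by decide]; exact hcon))))))

theorem portB_toList (s : String) :
    (replace_html_entities_alt s).toList = scanB s.toList := by
  simp [replace_html_entities_alt, String.toList_ofList]


-- ===== tightness: inside D_ the two programs differ everywhere (length argument) =====

theorem hB7sub : ∀ p ∈ tabB7, p ∈ tableBc := by decide
theorem hB7ampSub : ∀ p ∈ tabB7 ++ [ampPair], p ∈ tableBc := by decide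
theorem hA6sub : ∀ q ∈ tabA6, q ∈ tableBc := by decide
theorem hampMem : ampPair ∈ tableBc := by decide
theorem hampNotB7 : ampPair ∉ tabB7 := by decide
theorem hA6cons : ∀ q ∈ tabA6, q.1 = '&' :: q.1.tail := by decide
theorem hA6tailLen : ∀ q ∈ tabA6, 3 ≤ q.1.tail.length := by decide
theorem hA6val : ∀ q ∈ tabA6, q.2.length = 1 ∧ q.2 ≠ [] ∧ q.2.headD ' ' ≠ '&' := by decide
theorem hA6nodup : tabA6.Nodup := by decide
theorem hW6A6 : ∀ w ∈ W6c_replace, ∃ q ∈ tabA6, w = ampPair.1 ++ q.1.tail := by decide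
theorem hW6head : ∀ w ∈ W6c_replace, w.head? = some '&' := by decide
theorem hW6ne : ∀ w ∈ W6c_replace, w ≠ [] := by decide
theorem hW6notPref : ∀ w ∈ W6c_replace, ∀ p ∈ tableBc, p ≠ ampPair → ¬ p.1 <+: w ∧ ¬ w <+: p.1 := by
  decide
theorem hW6ampPref : ∀ w ∈ W6c_replace, ampPair.1 <+: w := by decide
theorem hTableSum : tabB7 ++ [ampPair] ++ tabA6 = tableBc := by decide

theorem scanB_append_clean : ∀ (a x : List Char), (∀ c ∈ a, c ≠ '&') →
    scanB (a ++ x) = a ++ scanB x := by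
  intro a
  induction a with
  | nil => simp
  | cons c a' ih =>
    intro x h
    rw [List.cons_append, scanB, if_neg (h c (by simp))]
    rw [ih x (fun d hd => h d (by simp [hd]))]
    simp

-- full evaluation of A at a cascade site '&amp;' ++ tail(q.1) ++ r2 for q an entry after '&amp;'
theorem applyKeyCascade (q : List Char × List Char) (hq : q ∈ tabA6) (r2 : List Char) :
    applyPasses tableBc (ampPair.1 ++ (q.1.tail ++ r2)) = q.2 ++ applyPasses tableBc r2 := by
  obtain ⟨hqk, hqkh, hqktail, hqv, hqvh⟩ := hTable q (hA6sub q hq)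
  obtain ⟨hak, hakh, haktail, hav, havh⟩ := hTable ampPair hampMem
  have htq : ∀ c ∈ q.1.tail, c ≠ '&' := fun c hc => hKeyTail q (hA6sub q hq) c hc
  have htqne : q.1.tail ≠ [] := by
    have := hA6tailLen q hq
    intro h; rw [h] at this; simp at this
  -- step 1: the seven passes before '&amp;' keep the '&amp;' prefix
  have h1 : applyPasses tabB7 (ampPair.1 ++ (q.1.tail ++ r2))
      = ampPair.1 ++ applyPasses tabB7 (q.1.tail ++ r2) := by
    apply splitPasses tabB7 _ _ hak (fun p hp => hTableE p (hB7sub p hp))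
    · intro m hm x hx
      exact hKeyTail ampPair hampMem x (drop_head_mem_tail ampPair.1 m x hm hx)
    · intro p hp hpre
      exact hampNotB7 ((hPF p (hB7sub p hp) ampPair hampMem hpre) ▸ hp)
    · intro p hp t hpt _
      exact hampNotB7 ((hPF ampPair hampMem p (hB7sub p hp) ⟨t, hpt.symm⟩).symm ▸ hp)
  -- step 2: the '&amp;' pass fires at the split point
  have h2 : ∀ x : List Char, PySem.Chars.replace (ampPair.1 ++ x) ampPair.1 ampPair.2
      = ampPair.2 ++ PySem.Chars.replace x ampPair.1 ampPair.2 := by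
    intro x
    rw [replace_eq_scanK _ _ _ hak, replace_eq_scanK _ _ _ hak,
        scanK_match _ _ _ hak (List.prefix_append _ _), List.drop_left]
  -- step 3: the first eight passes keep the plain prefix tail(q.1)
  have h3 : applyPasses (tabB7 ++ [ampPair]) (q.1.tail ++ r2)
      = q.1.tail ++ applyPasses (tabB7 ++ [ampPair]) r2 := by
    apply splitPasses _ _ _ htqne (fun p hp => hTableE p (hB7ampSub p hp))
    · intro m hm x hx
      exact htq x (List.mem_of_mem_tail (drop_head_mem_tail q.1.tail m x hm hx))
    · intro p hp hpre
      obtain ⟨h1', h2', _, _, _⟩ := hTable p (hB7ampSub p hp)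
      rcases hpp : p.1 with _ | ⟨p0, pt⟩
      · exact h1' hpp
      · rw [hpp] at h2' hpre
        simp at h2'
        rcases htqq : q.1.tail with _ | ⟨t0, tt⟩
        · exact htqne htqq
        · rw [htqq] at hpre
          have := (List.cons_prefix_cons.mp hpre).1
          exact htq t0 (by rw [htqq]; simp) (by rw [← this, h2'])
    · intro p hp t hpt _
      obtain ⟨h1', h2', _, _, _⟩ := hTable p (hB7ampSub p hp)
      rcases htqq : q.1.tail with _ | ⟨t0, tt⟩
      · exact htqne htqq
      · rw [htqq] at hpt
        have : p.1.head? = some t0 := by rw [hpt]; rfl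
        rw [h2'] at this
        simp at this
        exact htq t0 (by rw [htqq]; simp) this.symm
  -- step 4: the six passes after '&amp;' process q.1 ++ z like a fresh match of q
  obtain ⟨af1, af2, hdecA6⟩ := List.append_of_mem hq
  have hqnot1 : q ∉ af1 := by
    have hnd := hA6nodup
    rw [hdecA6] at hnd
    have := (List.nodup_cons.mp (List.nodup_middle.mp hnd)).1
    intro hc; exact this (List.mem_append_left _ hc)
  have hmem_af1 : ∀ p ∈ af1, p ∈ tableBc :=
    fun p hp => hA6sub p (hdecA6 ▸ List.mem_append_left _ hp)
  have hmem_af2 : ∀ p ∈ af2, p ∈ tableBc :=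
    fun p hp => hA6sub p (hdecA6 ▸ List.mem_append_right _ (List.mem_cons_of_mem _ hp))
  have h4 : ∀ z : List Char, applyPasses tabA6 (q.1 ++ z) = q.2 ++ applyPasses tabA6 z := by
    intro z
    have h4a : applyPasses af1 (q.1 ++ z) = q.1 ++ applyPasses af1 z := by
      apply splitPasses af1 _ _ hqk (fun p hp => hTableE p (hmem_af1 p hp))
      · intro m hm x hx
        exact hKeyTail q (hA6sub q hq) x (drop_head_mem_tail q.1 m x hm hx)
      · intro p hp hpre
        exact hqnot1 ((hPF p (hmem_af1 p hp) q (hA6sub q hq) hpre) ▸ hp)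
      · intro p hp t hpt _
        exact hqnot1 ((hPF q (hA6sub q hq) p (hmem_af1 p hp) ⟨t, hpt.symm⟩).symm ▸ hp)
    have h4b : ∀ x : List Char, PySem.Chars.replace (q.1 ++ x) q.1 q.2
        = q.2 ++ PySem.Chars.replace x q.1 q.2 := by
      intro x
      rw [replace_eq_scanK _ _ _ hqk, replace_eq_scanK _ _ _ hqk,
          scanK_match _ _ _ hqk (List.prefix_append _ _), List.drop_left]
    have h4c : ∀ u : List Char, applyPasses af2 (q.2 ++ u) = q.2 ++ applyPasses af2 u := by
      intro u
      obtain ⟨hv1, hv2, hv3⟩ := hA6val q hq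
      apply splitPasses af2 _ _ hv2 (fun p hp => hTableE p (hmem_af2 p hp))
      · intro m hm x hx
        rw [List.drop_eq_nil_of_le (by omega)] at hx
        simp at hx
      · intro p hp hpre
        have := (hLen p (hmem_af2 p hp)).1
        have := hpre.length_le
        omega
      · intro p hp t hpt _
        obtain ⟨h1', h2', _, _, _⟩ := hTable p (hmem_af2 p hp)
        have : p.1.head? = q.2.head? := by
          rw [hpt]
          rcases hq2 : q.2 with _ | ⟨v0, vt⟩
          · exact absurd hq2 hv2
          · rfl
        rw [h2', head?_headD_of_ne_nil q.2 ' ' hv2] at this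
        simp at this
        apply hv3
        rw [List.headD_eq_head?_getD, this.symm]
    calc applyPasses tabA6 (q.1 ++ z)
        = applyPasses af2 (applyPasses [q] (applyPasses af1 (q.1 ++ z))) := by
          rw [hdecA6, show af1 ++ q :: af2 = (af1 ++ [q]) ++ af2 by simp, applyPasses_append,
              applyPasses_append]
      _ = applyPasses af2 (q.2 ++ applyPasses (af1 ++ [q]) z) := by
          rw [h4a, show ∀ y, applyPasses [q] y = PySem.Chars.replace y q.1 q.2 from fun y => rfl,
              h4b, applyPasses_append,
              show ∀ y, applyPasses [q] y = PySem.Chars.replace y q.1 q.2 from fun y => rfl]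
      _ = q.2 ++ applyPasses af2 (applyPasses (af1 ++ [q]) z) := h4c _
      _ = q.2 ++ applyPasses tabA6 z := by
          rw [← applyPasses_append, show (af1 ++ [q]) ++ af2 = af1 ++ q :: af2 by simp, ← hdecA6]
  -- assemble
  calc applyPasses tableBc (ampPair.1 ++ (q.1.tail ++ r2))
      = applyPasses tabA6 (applyPasses [ampPair] (applyPasses tabB7 (ampPair.1 ++ (q.1.tail ++ r2)))) := by
        rw [← hTableSum, show tabB7 ++ [ampPair] ++ tabA6 = tabB7 ++ ([ampPair] ++ tabA6) by simp,
            applyPasses_append, applyPasses_append]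
    _ = applyPasses tabA6 (ampPair.2 ++ applyPasses (tabB7 ++ [ampPair]) (q.1.tail ++ r2)) := by
        rw [h1, show ∀ y, applyPasses [ampPair] y = PySem.Chars.replace y ampPair.1 ampPair.2 from
            fun y => rfl, h2, applyPasses_append,
            show ∀ y, applyPasses [ampPair] y = PySem.Chars.replace y ampPair.1 ampPair.2 from
            fun y => rfl]
    _ = applyPasses tabA6 (q.1 ++ applyPasses (tabB7 ++ [ampPair]) r2) := by
        rw [h3, show ampPair.2 ++ (q.1.tail ++ applyPasses (tabB7 ++ [ampPair]) r2)
            = ('&' :: q.1.tail) ++ applyPasses (tabB7 ++ [ampPair]) r2 by rfl, ← hA6cons q hq]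
    _ = q.2 ++ applyPasses tabA6 (applyPasses (tabB7 ++ [ampPair]) r2) := h4 _
    _ = q.2 ++ applyPasses tableBc r2 := by rw [← applyPasses_append, hTableSum]

theorem infix_shift (w : List Char) (hw : w.head? = some '&') :
    ∀ (K r : List Char), (∀ c ∈ K.tail, c ≠ '&') → w <:+: K ++ r → ¬ w <+: K ++ r → w <:+: r := by
  intro K
  induction K with
  | nil => intro r _ h _; simpa using h
  | cons k0 K' ih =>
    intro r hK h hnp
    rcases (List.infix_cons_iff.mp h) with hc | hc
    · exact absurd hc hnp
    · rcases hK' : K' with _ | ⟨c', K''⟩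
      · rw [hK'] at hc
        simpa using hc
      · apply ih r (fun c hcm => hK c (List.mem_of_mem_tail hcm)) (hK' ▸ hc)
        intro hcon
        rcases hww : w with _ | ⟨w0, w'⟩
        · rw [hww] at hw; simp at hw
        · rw [hww] at hw hcon
          simp at hw
          rw [hK'] at hcon
          have := (List.cons_prefix_cons.mp hcon).1
          exact hK c' (by rw [hK']; simp) (by rw [← this, hw])

theorem lenLe : ∀ n (l : List Char), l.length ≤ n →
    ((applyPasses tableBc l).length ≤ (scanB l).length ∧
     (∀ w ∈ W6c_replace, w <:+: l → (applyPasses tableBc l).length < (scanB l).length)) := by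
  intro n
  induction n using Nat.strong_induction_on with
  | _ n ih =>
    intro l hln
    match l with
    | [] =>
      constructor
      · rw [applyPasses_nil_input tableBc (fun p hp => (hTable p hp).1), scanB]
      · intro w hw hcon
        have := hW6ne w hw
        rcases hcon with ⟨u, v, huv⟩
        rcases w with _ | ⟨w0, w'⟩
        · exact absurd rfl this
        · exact absurd huv.symm (by simp)
    | (c :: t) =>
      have hn0 : 0 < n := by simp at hln; omega
      by_cases hfind : ∃ p ∈ tableBc, p.1 <+: (c :: t)
      · obtain ⟨p, hpmem, hpre⟩ := hfind
        obtain ⟨hk, hkh, hktail, hv, hvh⟩ := hTable p hpmem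
        obtain ⟨kt, hkt⟩ : ∃ kt, p.1 = '&' :: kt := by
          rcases hp1 : p.1 with _ | ⟨k0, kt⟩
          · exact absurd hp1 hk
          · rw [hp1] at hkh; simp at hkh; exact ⟨kt, by rw [hkh]⟩
        obtain ⟨r, hr⟩ := hpre
        have hpre' : p.1 <+: c :: t := ⟨r, hr⟩
        have huniq : ∀ q ∈ tableBc, (q.1.isPrefixOf (c :: t)) = true → q = p := by
          intro q hq hfq
          have hql : q.1 <+: c :: t := List.isPrefixOf_iff_prefix.mp hfq
          rcases List.prefix_or_prefix_of_prefix hql hpre' with h | h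
          · exact hPF q hq p hpmem h
          · exact (hPF p hpmem q hq h).symm
        have hc : c = '&' := by
          rw [hkt, List.cons_append] at hr
          exact ((List.cons.injEq _ _ _ _).mp hr).1.symm
        have ht : t = kt ++ r := by
          rw [hkt, List.cons_append] at hr
          exact ((List.cons.injEq _ _ _ _).mp hr).2.symm
        have hscan : scanB (c :: t) = p.2 ++ scanB (t.drop (p.1.length - 1)) := by
          rw [scanB, if_pos hc,
              find?_unique (fun q => q.1.isPrefixOf (c :: t)) tableBc p hpmem
                (List.isPrefixOf_iff_prefix.mpr hpre') huniq]
        have hdrop : t.drop (p.1.length - 1) = r := by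
          rw [ht, hkt]
          simp only [List.length_cons, Nat.add_sub_cancel]
          exact List.drop_left
        have hlen4 := (hLen p hpmem).1
        have hpl : p.1.length + r.length = t.length + 1 := by
          have := congrArg List.length hr
          simpa using this
        have hrlen : r.length + 4 ≤ n := by simp at hln; omega
        have hNoPrefW : ∀ w ∈ W6c_replace, p ≠ ampPair → ¬ w <+: (c :: t) := by
          intro w hw hpa hcon
          rcases List.prefix_or_prefix_of_prefix hcon hpre' with h | h
          · exact (hW6notPref w hw p hpmem hpa).2 h
          · exact (hW6notPref w hw p hpmem hpa).1 h
        by_cases hpamp : p = ampPair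
        · -- the '&amp;' entry: split on whether a cascade fires here
          by_cases hcas : ∃ q ∈ tabA6, q.1.tail <+: r
          · obtain ⟨q, hqA6, hqr⟩ := hcas
            obtain ⟨r2, hr2⟩ := hqr
            obtain ⟨hv1, hv2, _⟩ := hA6val q hqA6
            have htq : ∀ ch ∈ q.1.tail, ch ≠ '&' :=
              fun ch hch => hKeyTail q (hA6sub q hqA6) ch hch
            have hA : applyPasses tableBc (c :: t)
                = q.2 ++ applyPasses tableBc r2 := by
              rw [← hr, hpamp, ← hr2]
              exact applyKeyCascade q hqA6 r2
            have hB : scanB (c :: t) = p.2 ++ (q.1.tail ++ scanB r2) := by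
              rw [hscan, hdrop, ← hr2, scanB_append_clean _ _ htq]
            have htl := hA6tailLen q hqA6
            have hr2len : r2.length < n := by
              have h1 := congrArg List.length hr2
              simp at h1
              have h2 := hA6tailLen q hqA6
              simp at hln
              omega
            have hih := (ih (n-1) (by omega) r2 (by omega)).1
            have hp2 : p.2.length = 1 := by rw [hpamp]; rfl
            constructor
            · rw [hA, hB]
              simp only [List.length_append, hv1, hp2]
              omega
            · intro w hw hwinf
              rw [hA, hB]
              simp only [List.length_append, hv1, hp2]
              omega
          · -- no cascade here: behaves like every other entry
            have hafter : ∀ q ∈ tabA6, ∀ t', q.1 = p.2 ++ t' →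
                ¬ t' <+: applyPasses (tabB7 ++ [p]) r := by
              intro q hq t' hqt hcon
              obtain ⟨hqk, hqkh, hqktail, hqv, hqvh⟩ := hTable q (hA6sub q hq)
              have ht'tail : t' = q.1.tail := by rw [hqt, hpamp]; rfl
              have htclean : ∀ ch ∈ t', ch ∉ VHrepl := by
                intro ch hch
                exact hqktail ch (ht'tail ▸ hch)
              have ht'r : t' <+: r := by
                apply preserveN (tabB7 ++ [p]) r t' _ hcon
                intro q' hq'
                have hq'mem : q' ∈ tableBc := by
                  apply hB7ampSub
                  rw [← hpamp]
                  exact hq'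
                obtain ⟨h1, _, _, h4, h5⟩ := hTable q' hq'mem
                refine ⟨h1, q'.2.headD ' ', head?_headD_of_ne_nil q'.2 ' ' h4, fun hmem => ?_⟩
                exact htclean _ hmem h5
              exact hcas ⟨q, hq, ht'tail ▸ ht'r⟩
            have happ : applyPasses tableBc (c :: t) = p.2 ++ applyPasses tableBc r := by
              rw [← hr]
              exact applyKey p hpmem tabB7 tabA6 r (by rw [hpamp]; exact hsplit)
                (by rw [show tabB7 ++ [p] = tabB7 ++ [p] from rfl]; exact hafter)
            have hih := ih (n-1) (by omega) r (by omega)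
            constructor
            · rw [happ, hscan, hdrop]; simp; exact hih.1
            · intro w hw hwinf
              rw [happ, hscan, hdrop]
              simp
              apply hih.2 w hw
              apply infix_shift w (hW6head w hw) p.1 r
                (fun ch hch => hKeyTail p hpmem ch hch) (hr ▸ hwinf)
              intro hcon
              obtain ⟨qw, hqw, hweq⟩ := hW6A6 w hw
              rw [hweq, ← hpamp] at hcon
              exact hcas ⟨qw, hqw, (List.prefix_append_right_inj p.1).mp hcon⟩
        · -- an entry other than '&amp;': the value never starts a later key
          have hafter : ∀ bf af, tableBc = bf ++ p :: af →
              (∀ q ∈ af, ∀ t', q.1 = p.2 ++ t' → ¬ t' <+: applyPasses (bf ++ [p]) r) := by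
            intro bf af hdec q hq t' hqt _
            obtain ⟨hqk, hqkh, _, _, _⟩ := hTable q
              (hdec ▸ List.mem_append_right _ (List.mem_cons_of_mem _ hq))
            obtain ⟨v0, vt, hv0⟩ : ∃ v0 vt, p.2 = v0 :: vt := by
              rcases hp2 : p.2 with _ | ⟨v0, vt⟩
              · exact absurd hp2 hv
              · exact ⟨v0, vt, rfl⟩
            have hv0amp : v0 = '&' := by
              rw [hv0] at hqt
              rw [hqt] at hqkh
              simp at hqkh
              exact hqkh
            exact hpamp (by
              by_contra hne
              exact hNoAmpVal p hpmem hne (by rw [hv0, hv0amp]; rfl))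
          obtain ⟨bf, af, hdec⟩ := List.append_of_mem hpmem
          have happ : applyPasses tableBc (c :: t) = p.2 ++ applyPasses tableBc r := by
            rw [← hr]
            exact applyKey p hpmem bf af r hdec (hafter bf af hdec)
          have hih := ih (n-1) (by omega) r (by omega)
          constructor
          · rw [happ, hscan, hdrop]; simp; exact hih.1
          · intro w hw hwinf
            rw [happ, hscan, hdrop]
            simp
            apply hih.2 w hw
            exact infix_shift w (hW6head w hw) p.1 r
              (fun ch hch => hKeyTail p hpmem ch hch) (hr ▸ hwinf)
              (hr ▸ hNoPrefW w hw hpamp)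
      · push Not at hfind
        have happ : applyPasses tableBc ([c] ++ t) = [c] ++ applyPasses tableBc t := by
          apply splitPasses tableBc [c] t (by simp) hTableE
          · intro m hm x hx
            rcases m with _ | m
            · omega
            · simp at hx
          · intro q hq hpre
            have h1 := (hLen q hq).1
            have := hpre.length_le
            simp at this
            omega
          · intro q hq t' hqt hcon
            apply hfind q hq
            rw [hqt]
            exact List.cons_prefix_cons.mpr ⟨rfl, hcon⟩
        simp only [List.singleton_append] at happ
        have hscan : scanB (c :: t) = c :: scanB t := by
          rw [scanB]
          by_cases hc : c = '&'
          · rw [if_pos hc]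
            rw [List.find?_eq_none.mpr (fun q hq => by
              simpa [List.isPrefixOf_iff_prefix] using hfind q hq)]
          · rw [if_neg hc]
        have hih := ih (n-1) (by omega) t (by simp at hln; omega)
        constructor
        · rw [happ, hscan]; simp; exact hih.1
        · intro w hw hwinf
          rw [happ, hscan]
          simp
          apply hih.2 w hw
          rcases List.infix_cons_iff.mp hwinf with hcon | hcon
          · exfalso
            have := (hW6ampPref w hw).trans hcon
            exact hfind ampPair hampMem this
          · exact hcon

theorem D_infix (s : String) (h : D_replace_html_entities s) :
    ∃ w ∈ W6c_replace, w <:+: s.toList := by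
  unfold D_replace_html_entities at h
  rcases h with h | h | h | h | h | h
  · exact ⟨['&','a','m','p',';','l','t',';'], by decide, by
      have := (PySem.Str.isIn_iff_infix _ _).mp h
      rwa [show "&amp;lt;".toList = ['&','a','m','p',';','l','t',';'] from by decide] at this⟩
  · exact ⟨['&','a','m','p',';','g','t',';'], by decide, by
      have := (PySem.Str.isIn_iff_infix _ _).mp h
      rwa [show "&amp;gt;".toList = ['&','a','m','p',';','g','t',';'] from by decide] at this⟩
  · exact ⟨['&','a','m','p',';','q','u','o','t',';'], by decide, by
      have := (PySem.Str.isIn_iff_infix _ _).mp h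
      rwa [show "&amp;quot;".toList = ['&','a','m','p',';','q','u','o','t',';'] from by decide] at this⟩
  · exact ⟨['&','a','m','p',';','a','p','o','s',';'], by decide, by
      have := (PySem.Str.isIn_iff_infix _ _).mp h
      rwa [show "&amp;apos;".toList = ['&','a','m','p',';','a','p','o','s',';'] from by decide] at this⟩
  · exact ⟨['&','a','m','p',';','#','3','9',';'], by decide, by
      have := (PySem.Str.isIn_iff_infix _ _).mp h
      rwa [show "&amp;#39;".toList = ['&','a','m','p',';','#','3','9',';'] from by decide] at this⟩
  · exact ⟨['&','a','m','p',';','#','x','2','7',';'], by decide, by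
      have := (PySem.Str.isIn_iff_infix _ _).mp h
      rwa [show "&amp;#x27;".toList = ['&','a','m','p',';','#','x','2','7',';'] from by decide] at this⟩

-- ===== VERDICT (by name: the statement is the Claim_ definition above) =====
theorem replace_html_entities_spec : Claim_unchanged_replace_html_entities := by
  intro s _
  unfold Spec_replace_html_entities
  intro hnD
  apply String.toList_inj.mp
  rw [portA_toList, portB_toList]
  exact mainEq s.toList.length s.toList le_rfl (notD_infix s hnD)

set_option maxRecDepth 10000 in
theorem replace_html_entities_tight : Claim_exact_replace_html_entities := by
  intro s _ hD heq
  obtain ⟨w, hw, hinf⟩ := D_infix s hD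
  have hlt := (lenLe s.toList.length s.toList le_rfl).2 w hw hinf
  have : (replace_html_entities s).toList = (replace_html_entities_alt s).toList := by rw [heq]
  rw [portA_toList, portB_toList] at this
  rw [this] at hlt
  omega

set_option maxRecDepth 10000 in
theorem replace_html_entities_changed : Claim_changed_replace_html_entities := by
  unfold Claim_changed_replace_html_entities
  refine ⟨by decide, by decide, by decide, ?_, by decide⟩
  rw [← String.toList_inj]
  have h : pvDiffWitness_replace_html_entities.toList = ['&','a','m','p',';','l','t',';'] := by decide
  simp only [replace_html_entities_alt, String.toList_ofList, h]
  simp [scanB, tableBc]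
  decide
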